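-- pv_equiv track=rewrite | github.com/misosiruda/CordingTest | 프로그래머스/2/17679. ［1차］ 프렌즈4블록/［1차］ 프렌즈4블록.py | erase_block
-- ===== SOURCE A (Python) =====
-- import copy
--
-- def erase_block(m, n, board):
--     tmp = copy.deepcopy(board)
--     check = [[0] * n for _ in range(m)]
--
--     # (r, c)
--     # search_range = [[(0, -1), (-1, -1), (-1, 0)],
--     #                 [(0, 1), (-1, 1), (-1, 0)],
--     #                 [(0, -1), (1, -1), (1, 0)],
--     #                 [(0, 1), (1, 1), (1, 0)]]
--
--     for r in range(m):
--         for c in range(n):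
--             if board[r][c] == ' ':
--                 continue
--
--             if 'A'<=board[r][c]<='Z':
--                 if 0 <= r - 1 < m and 0 <= c - 1 < n and len(
--                         set([board[r][c], board[r][c - 1], board[r - 1][c - 1], board[r - 1][c]])) == 1:
--                     check[r][c] = 1;
--                     tmp[r][c] = ' '
--                     check[r][c-1] = 1;
--                     tmp[r][c-1] = ' '
--                     check[r - 1][c - 1] = 1;
--                     tmp[r - 1][c - 1] = ' '
--                     check[r - 1][c] = 1;
--                     tmp[r - 1][c] = ' '
--
--                 elif 0 <= r - 1 < m and 0 <= c + 1 < n and len(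
--                         set([board[r][c], board[r][c + 1], board[r - 1][c + 1], board[r - 1][c]])) == 1:
--                     check[r][c] = 1;
--                     tmp[r][c] = ' '
--                     check[r][c + 1] = 1;
--                     tmp[r][c + 1] = ' '
--                     check[r - 1][c + 1] = 1;
--                     tmp[r - 1][c + 1] = ' '
--                     check[r - 1][c] = 1;
--                     tmp[r - 1][c] = ' '
--
--                 elif 0 <= r + 1 < m and 0 <= c - 1 < n and len(
--                         set([board[r][c], board[r][c - 1], board[r + 1][c - 1], board[r + 1][c]])) == 1:
--                     check[r][c] = 1;
--                     tmp[r][c] = ' '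
--                     check[r][c - 1] = 1;
--                     tmp[r][c - 1] = ' '
--                     check[r + 1][c - 1] = 1;
--                     tmp[r + 1][c - 1] = ' '
--                     check[r + 1][c] = 1;
--                     tmp[r + 1][c] = ' '
--
--                 elif 0 <= r + 1 < m and 0 <= c + 1 < n and len(
--                         set([board[r][c], board[r][c + 1], board[r + 1][c + 1], board[r + 1][c]])) == 1:
--                     check[r][c] = 1;
--                     tmp[r][c] = ' '
--                     check[r][c + 1] = 1;
--                     tmp[r][c + 1] = ' '
--                     check[r + 1][c + 1] = 1;
--                     tmp[r + 1][c + 1] = ' '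
--                     check[r + 1][c] = 1;
--                     tmp[r + 1][c] = ' '
--
--             else:
--                 continue
--
--     return tmp, sum([sum(row) for row in check])
-- ===== SOURCE B (Python) =====
-- def erase_block(m, n, board):
--     erased = set()
--     for r in range(m - 1):
--         for c in range(n - 1):
--             v = board[r][c]
--             if 'A' <= v <= 'Z' and board[r][c + 1] == v and board[r + 1][c] == v and board[r + 1][c + 1] == v:
--                 erased.update({(r, c), (r, c + 1), (r + 1, c), (r + 1, c + 1)})
--     tmp = [[' ' if (r, c) in erased else cell for c, cell in enumerate(row)] for r, row in enumerate(board)]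
--     return tmp, len(erased)
-- ===== Notes on version B (the rewrite author's own statement) =====
-- stated objective: simpler
-- what changed: B replaces A's per-cell scan with a four-way elif orientation chain and two mutated matrices (tmp and a 0/1 check grid) by a single scan over 2x2-block top-left corners that collects erased coordinates into one set, then rebuilds the board and returns the set's size.
import Mathlib
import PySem

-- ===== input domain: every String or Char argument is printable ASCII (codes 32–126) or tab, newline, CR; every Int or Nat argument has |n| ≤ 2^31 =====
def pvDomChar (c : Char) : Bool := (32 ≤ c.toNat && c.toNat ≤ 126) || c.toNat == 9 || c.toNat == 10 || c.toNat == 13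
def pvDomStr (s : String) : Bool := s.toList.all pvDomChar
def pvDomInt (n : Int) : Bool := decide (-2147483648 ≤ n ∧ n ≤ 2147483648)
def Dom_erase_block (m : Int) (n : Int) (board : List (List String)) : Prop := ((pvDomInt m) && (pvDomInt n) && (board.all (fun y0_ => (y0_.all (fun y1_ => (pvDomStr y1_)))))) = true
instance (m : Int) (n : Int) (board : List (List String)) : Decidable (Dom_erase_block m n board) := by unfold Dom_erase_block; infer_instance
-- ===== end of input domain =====

-- B replaces A's per-cell four-orientation elif chain over two mutated matrices by one
-- corner scan collecting an erased-coordinate set, then a rebuild; same cost, simpler.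

-- ===== PORT A =====
-- board[r][c] (total form; every use is guarded in range under Pre_, so the default is never read)
def pvGet2 (g : List (List String)) (r c : Int) : String :=
  PySem.List.pyGetD (PySem.List.pyGetD g r []) c ""

-- g[r][c] = v (total form; used only with guarded, in-range nonnegative indices)
def pvSet2 {α : Type} (g : List (List α)) (r c : Int) (v : α) : List (List α) :=
  PySem.List.pySetD g r (PySem.List.pySetD (PySem.List.pyGetD g r []) c v)

-- the four cells A touches in one orientation branch, in A's statement order
def pvBlockPts (r c dr dc : Int) : List (Int × Int) :=
  [(r, c), (r, c + dc), (r + dr, c + dc), (r + dr, c)]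

-- one orientation test: 0 <= r+dr < m and 0 <= c+dc < n and len(set([...])) == 1
def pvCond (board : List (List String)) (m n r c dr dc : Int) : Bool :=
  decide (0 ≤ r + dr) && decide (r + dr < m) && decide (0 ≤ c + dc) && decide (c + dc < n) &&
  ((PySem.Set.ofList [pvGet2 board r c, pvGet2 board r (c + dc),
      pvGet2 board (r + dr) (c + dc), pvGet2 board (r + dr) c]).length == 1)

-- the four 'check[..] = 1; tmp[..] = ' '' statement pairs of one branch
def pvMark (st : List (List String) × List (List Int)) (pts : List (Int × Int)) :
    List (List String) × List (List Int) :=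
  pts.foldl (fun st p => (pvSet2 st.1 p.1 p.2 " ", pvSet2 st.2 p.1 p.2 1)) st

-- the body of A's inner loop
def pvBodyA (board : List (List String)) (m n : Int)
    (st : List (List String) × List (List Int)) (r c : Int) :
    List (List String) × List (List Int) :=
  let v := pvGet2 board r c
  if v == " " then st
  else if decide ("A" ≤ v) && decide (v ≤ "Z") then
    if pvCond board m n r c (-1) (-1) then pvMark st (pvBlockPts r c (-1) (-1))
    else if pvCond board m n r c (-1) 1 then pvMark st (pvBlockPts r c (-1) 1)
    else if pvCond board m n r c 1 (-1) then pvMark st (pvBlockPts r c 1 (-1))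
    else if pvCond board m n r c 1 1 then pvMark st (pvBlockPts r c 1 1)
    else st
  else st

def erase_block (m : Int) (n : Int) (board : List (List String)) : List (List String) × Int :=
  let tmp := board  -- copy.deepcopy(board): Lean lists are immutable
  let check := List.replicate m.toNat (List.replicate n.toNat (0 : Int))
  let st := (PySem.List.pyRange 0 m 1).foldl (fun st r =>
      (PySem.List.pyRange 0 n 1).foldl (fun st c => pvBodyA board m n st r c) st) (tmp, check)
  (st.1, (st.2.map (fun row => row.foldl (· + ·) 0)).foldl (· + ·) 0)  -- sum(...) as its left fold

-- ===== PORT B =====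
-- 'A' <= v <= 'Z' and the three other cells of the corner's 2x2 block equal v
def pvCorner (board : List (List String)) (r c : Int) : Bool :=
  let v := pvGet2 board r c
  decide ("A" ≤ v) && decide (v ≤ "Z") && (pvGet2 board r (c + 1) == v) &&
    (pvGet2 board (r + 1) c == v) && (pvGet2 board (r + 1) (c + 1) == v)

def erase_block_alt (m : Int) (n : Int) (board : List (List String)) : List (List String) × Int :=
  let erased : PySem.Set (Int × Int) :=
    (PySem.List.pyRange 0 (m - 1) 1).foldl (fun e r =>
      (PySem.List.pyRange 0 (n - 1) 1).foldl (fun e c =>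
        if pvCorner board r c then
          PySem.Set.update e [(r, c), (r, c + 1), (r + 1, c), (r + 1, c + 1)]
        else e) e) PySem.Set.empty
  let tmp := (PySem.List.enumerate board).map (fun p =>
      (PySem.List.enumerate p.2).map (fun q =>
        if PySem.Set.contains erased (p.1, q.1) then " " else q.2))
  (tmp, (erased.length : Int))

-- ===== PRECONDITION & SPEC =====
-- Exactly where A returns: if n ≤ 0 A never indexes board; otherwise A indexes board[r][c]
-- for every r < m, c < n, so it needs m rows and, in the first m rows, at least n cells each.
def Pre_erase_block (m : Int) (n : Int) (board : List (List String)) : Prop :=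
  0 < n → (m ≤ (board.length : Int) ∧ ∀ row ∈ board.take m.toNat, n ≤ (row.length : Int))
instance (m : Int) (n : Int) (board : List (List String)) : Decidable (Pre_erase_block m n board) := by
  unfold Pre_erase_block; infer_instance

def pvWitness_erase_block : Int × Int × List (List String) :=
  (2, 2, [["A", "A"], ["A", "A"]])

def Spec_erase_block (m : Int) (n : Int) (board : List (List String)) (out : List (List String) × Int) : Prop := out = erase_block_alt m n board
instance (m : Int) (n : Int) (board : List (List String)) (out : List (List String) × Int) : Decidable (Spec_erase_block m n board out) := by unfold Spec_erase_block; infer_instance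

-- ===== CLAIM (what is proved, stated in full; the proofs are below) =====
def Claim_equal_erase_block : Prop := ∀ (m : Int) (n : Int) (board : List (List String)), Dom_erase_block m n board → Pre_erase_block m n board → Spec_erase_block m n board (erase_block m n board)


-- ===== LEMMAS AND PROOFS =====

-- the set of cells A's branch at (r, c) marks (empty when no branch fires)
def pvFired (board : List (List String)) (m n r c : Int) : List (Int × Int) :=
  let v := pvGet2 board r c
  if v == " " then []
  else if decide ("A" ≤ v) && decide (v ≤ "Z") then
    if pvCond board m n r c (-1) (-1) then pvBlockPts r c (-1) (-1)
    else if pvCond board m n r c (-1) 1 then pvBlockPts r c (-1) 1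
    else if pvCond board m n r c 1 (-1) then pvBlockPts r c 1 (-1)
    else if pvCond board m n r c 1 1 then pvBlockPts r c 1 1
    else []
  else []

-- cells erased by the final result: members of some all-equal uppercase 2x2 block
def MarkedP (board : List (List String)) (m n : Int) (p : Int × Int) : Prop :=
  ∃ r c, 0 ≤ r ∧ r < m - 1 ∧ 0 ≤ c ∧ c < n - 1 ∧ pvCorner board r c = true ∧
    p ∈ [(r, c), (r, c + 1), (r + 1, c), (r + 1, c + 1)]

-- board with the cells in S blanked
def renderF (board : List (List String)) (S : Int × Int → Bool) : List (List String) :=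
  (PySem.List.enumerate board).map (fun p =>
    (PySem.List.enumerate p.2).map (fun q => if S (p.1, q.1) then " " else q.2))

-- m×n 0/1 indicator matrix of S
def indF (m n : Int) (S : Int × Int → Bool) : List (List Int) :=
  (List.range m.toNat).map (fun (i : Nat) =>
    (List.range n.toNat).map (fun (j : Nat) => if S ((i : Int), (j : Int)) then 1 else 0))

-- board has at least m rows of at least n cells (consequence of Pre_ used everywhere below)
def DimOk (board : List (List String)) (m n : Int) : Prop :=
  ∀ r c : Int, 0 ≤ r → r < m → 0 ≤ c → c < n →
    r.toNat < board.length ∧ c.toNat < (board.getD r.toNat []).length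

theorem renderF_false (board : List (List String)) :
    renderF board (fun _ => false) = board := by
  simp [renderF, PySem.List.map_snd_enumerate]

theorem indF_false (m n : Int) :
    indF m n (fun _ => false) = List.replicate m.toNat (List.replicate n.toNat (0 : Int)) := by
  simp [indF, List.map_const', List.length_range]

theorem renderF_length (board : List (List String)) (S : Int × Int → Bool) :
    (renderF board S).length = board.length := by
  simp [renderF, PySem.List.length_enumerate]

theorem renderF_getElem (board : List (List String)) (S : Int × Int → Bool) (i : Nat)
    (h : i < board.length) :
    (renderF board S)[i]'(by rw [renderF_length]; exact h) =
      (PySem.List.enumerate board[i]).map (fun q => if S ((i : Int), q.1) then " " else q.2) := by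
  simp [renderF, PySem.List.getElem_enumerate]

theorem render_step (board : List (List String)) (S : Int × Int → Bool) (r c : Int)
    (h0 : 0 ≤ r) (h1 : r.toNat < board.length) (h2 : 0 ≤ c)
    (_h3 : c.toNat < (board.getD r.toNat []).length) :
    pvSet2 (renderF board S) r c " " = renderF board (fun p => S p || p == (r, c)) := by
  have hr : ((r.toNat : Int)) = r := Int.toNat_of_nonneg h0
  have hc : ((c.toNat : Int)) = c := Int.toNat_of_nonneg h2
  unfold pvSet2
  rw [PySem.List.pySetD_of_nonneg _ _ h0, PySem.List.pySetD_of_nonneg _ _ h2,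
      PySem.List.pyGetD_eq_getElem _ _ h0 (by rw [renderF_length]; omega)]
  apply List.ext_getElem
  · simp [renderF_length]
  · intro i hi hi'
    have hib : i < board.length := by rw [List.length_set, renderF_length] at hi; omega
    rw [List.getElem_set, renderF_getElem board (fun p => S p || p == (r, c)) i hib]
    by_cases hir : r.toNat = i
    · subst hir
      rw [if_pos rfl, renderF_getElem board S r.toNat h1]
      apply List.ext_getElem
      · simp [PySem.List.length_enumerate]
      · intro j hj hj'
        have hjb : j < (board[r.toNat]).length := by
          simp [PySem.List.length_enumerate] at hj'; omega
        simp only [List.getElem_set, List.getElem_map, PySem.List.getElem_enumerate, zero_add]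
        by_cases hjc : c.toNat = j
        · subst hjc
          simp [hr, hc]
        · have hne : ((j : Int)) ≠ c := by omega
          simp [hjc, hr, hne]
    · simp only [if_neg hir]
      rw [renderF_getElem board S i hib]
      have : ((i : Int)) ≠ r := by omega
      apply List.map_congr_left
      intro q _
      have hbeq : (((i : Int), q.1) == (r, c)) = false := by simp [this]
      simp [hbeq]

theorem indF_length (m n : Int) (S : Int × Int → Bool) : (indF m n S).length = m.toNat := by
  simp [indF]

theorem indF_getElem (m n : Int) (S : Int × Int → Bool) (i : Nat) (h : i < m.toNat) :
    (indF m n S)[i]'(by rw [indF_length]; exact h) =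
      (List.range n.toNat).map (fun (j : Nat) => if S ((i : Int), (j : Int)) then 1 else 0) := by
  unfold indF
  simp only [List.getElem_map, List.getElem_range]

theorem ind_step (m n : Int) (S : Int × Int → Bool) (r c : Int)
    (h0 : 0 ≤ r) (h1 : r < m) (h2 : 0 ≤ c) (h3 : c < n) :
    pvSet2 (indF m n S) r c 1 = indF m n (fun p => S p || p == (r, c)) := by
  have hr : ((r.toNat : Int)) = r := Int.toNat_of_nonneg h0
  have hc : ((c.toNat : Int)) = c := Int.toNat_of_nonneg h2
  have h1' : r.toNat < m.toNat := by omega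
  have h3' : c.toNat < n.toNat := by omega
  unfold pvSet2
  rw [PySem.List.pySetD_of_nonneg _ _ h0, PySem.List.pySetD_of_nonneg _ _ h2,
      PySem.List.pyGetD_eq_getElem _ _ h0 (by rw [indF_length]; omega)]
  apply List.ext_getElem
  · simp [indF_length]
  · intro i hi hi'
    have hib : i < m.toNat := by rw [List.length_set, indF_length] at hi; omega
    rw [List.getElem_set, indF_getElem m n (fun p => S p || p == (r, c)) i hib]
    by_cases hir : r.toNat = i
    · subst hir
      simp only [if_true]
      rw [indF_getElem m n S r.toNat h1']
      apply List.ext_getElem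
      · simp
      · intro j hj hj'
        have hjb : j < n.toNat := by simp at hj'; omega
        simp only [List.getElem_set, List.getElem_map, List.getElem_range]
        by_cases hjc : c.toNat = j
        · subst hjc
          rw [if_pos rfl, hr, hc]
          simp
        · have hne : ((j : Int)) ≠ c := by omega
          rw [if_neg hjc, hr]
          have hbeq : (((r : Int), (j : Int)) == (r, c)) = false := by simp [hne]
          simp [hbeq]
    · simp only [if_neg hir]
      rw [indF_getElem m n S i hib]
      have hne : ((i : Int)) ≠ r := by omega
      apply List.map_congr_left
      intro q _
      simp [hne]

theorem mark_all (board : List (List String)) (m n : Int) (S : Int × Int → Bool)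
    (pts : List (Int × Int)) (hd : DimOk board m n)
    (hpts : ∀ p ∈ pts, 0 ≤ p.1 ∧ p.1 < m ∧ 0 ≤ p.2 ∧ p.2 < n) :
    pvMark (renderF board S, indF m n S) pts =
      (renderF board (fun p => S p || pts.contains p),
       indF m n (fun p => S p || pts.contains p)) := by
  induction pts generalizing S with
  | nil => simp [pvMark]
  | cons p pts ih =>
    obtain ⟨hp0, hp1, hp2, hp3⟩ := hpts p (by simp)
    obtain ⟨hb1, hb2⟩ := hd p.1 p.2 hp0 hp1 hp2 hp3
    unfold pvMark
    rw [List.foldl_cons]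
    have hstep : (pvSet2 (renderF board S) p.1 p.2 " ", pvSet2 (indF m n S) p.1 p.2 1) =
        (renderF board (fun q => S q || q == p), indF m n (fun q => S q || q == p)) := by
      rw [render_step board S p.1 p.2 hp0 hb1 hp2 hb2, ind_step m n S p.1 p.2 hp0 hp1 hp2 hp3]
    simp only at hstep
    rw [hstep]
    have ih' := ih (fun q => S q || q == p) (fun q hq => hpts q (by simp [hq]))
    unfold pvMark at ih'
    rw [ih']
    have hS : (fun q => (S q || q == p) || pts.contains q) =
        (fun q => S q || (p :: pts).contains q) := by
      funext q
      rw [List.contains_cons, Bool.or_assoc]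
    rw [hS]

theorem cond_bounds (board : List (List String)) (m n r c dr dc : Int)
    (h : pvCond board m n r c dr dc = true) :
    0 ≤ r + dr ∧ r + dr < m ∧ 0 ≤ c + dc ∧ c + dc < n := by
  unfold pvCond at h
  simp only [Bool.and_eq_true, decide_eq_true_eq] at h
  exact ⟨h.1.1.1.1, h.1.1.1.2, h.1.1.2, h.1.2⟩

theorem fired_bounds (board : List (List String)) (m n r c : Int)
    (h0 : 0 ≤ r) (h1 : r < m) (h2 : 0 ≤ c) (h3 : c < n) :
    ∀ p ∈ pvFired board m n r c, 0 ≤ p.1 ∧ p.1 < m ∧ 0 ≤ p.2 ∧ p.2 < n := by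
  unfold pvFired
  dsimp only
  split_ifs with hsp hup hc1 hc2 hc3 hc4 <;>
    try (intro p hp; exact absurd hp (List.not_mem_nil))
  · have := cond_bounds board m n r c (-1) (-1) hc1
    intro p hp
    simp only [pvBlockPts, List.mem_cons, List.not_mem_nil, or_false] at hp
    rcases hp with rfl | rfl | rfl | rfl <;> simp <;> omega
  · have := cond_bounds board m n r c (-1) 1 hc2
    intro p hp
    simp only [pvBlockPts, List.mem_cons, List.not_mem_nil, or_false] at hp
    rcases hp with rfl | rfl | rfl | rfl <;> simp <;> omega
  · have := cond_bounds board m n r c 1 (-1) hc3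
    intro p hp
    simp only [pvBlockPts, List.mem_cons, List.not_mem_nil, or_false] at hp
    rcases hp with rfl | rfl | rfl | rfl <;> simp <;> omega
  · have := cond_bounds board m n r c 1 1 hc4
    intro p hp
    simp only [pvBlockPts, List.mem_cons, List.not_mem_nil, or_false] at hp
    rcases hp with rfl | rfl | rfl | rfl <;> simp <;> omega

theorem contains_nil_or (S : Int × Int → Bool) :
    (fun p => S p || ([] : List (Int × Int)).contains p) = S := by
  funext p; simp

theorem bodyA_eq (board : List (List String)) (m n : Int) (S : Int × Int → Bool) (r c : Int)
    (hd : DimOk board m n) (h0 : 0 ≤ r) (h1 : r < m) (h2 : 0 ≤ c) (h3 : c < n) :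
    pvBodyA board m n (renderF board S, indF m n S) r c =
      (renderF board (fun p => S p || (pvFired board m n r c).contains p),
       indF m n (fun p => S p || (pvFired board m n r c).contains p)) := by
  have hb := fired_bounds board m n r c h0 h1 h2 h3
  unfold pvBodyA pvFired
  unfold pvFired at hb
  dsimp only at hb ⊢
  split_ifs at hb ⊢ <;>
    first
      | rw [contains_nil_or]
      | exact mark_all board m n S _ hd hb

theorem foldc_eq (board : List (List String)) (m n : Int) (hd : DimOk board m n) (r : Int)
    (h0 : 0 ≤ r) (h1 : r < m) (cs : List Int) (hcs : ∀ c ∈ cs, 0 ≤ c ∧ c < n)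
    (S : Int × Int → Bool) :
    cs.foldl (fun st c => pvBodyA board m n st r c) (renderF board S, indF m n S) =
      (renderF board (fun p => S p || cs.any (fun c => (pvFired board m n r c).contains p)),
       indF m n (fun p => S p || cs.any (fun c => (pvFired board m n r c).contains p))) := by
  induction cs generalizing S with
  | nil =>
    have h : (fun p => S p || List.any [] (fun c => (pvFired board m n r c).contains p)) = S := by
      funext p; simp
    rw [List.foldl_nil, h]
  | cons c cs ih =>
    obtain ⟨hc0, hc1⟩ := hcs c (by simp)
    rw [List.foldl_cons, bodyA_eq board m n S r c hd h0 h1 hc0 hc1,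
        ih (fun c hc => hcs c (by simp [hc]))]
    have h : (fun p => (S p || (pvFired board m n r c).contains p) ||
        cs.any (fun c => (pvFired board m n r c).contains p)) =
        (fun p => S p || (c :: cs).any (fun c => (pvFired board m n r c).contains p)) := by
      funext p
      rw [List.any_cons, Bool.or_assoc]
    rw [h]

theorem foldr_eq (board : List (List String)) (m n : Int) (hd : DimOk board m n)
    (rs : List Int) (hrs : ∀ r ∈ rs, 0 ≤ r ∧ r < m) (S : Int × Int → Bool) :
    rs.foldl (fun st r => (PySem.List.pyRange 0 n 1).foldl
        (fun st c => pvBodyA board m n st r c) st) (renderF board S, indF m n S) =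
      (renderF board (fun p => S p || rs.any (fun r => (PySem.List.pyRange 0 n 1).any
          (fun c => (pvFired board m n r c).contains p))),
       indF m n (fun p => S p || rs.any (fun r => (PySem.List.pyRange 0 n 1).any
          (fun c => (pvFired board m n r c).contains p)))) := by
  induction rs generalizing S with
  | nil =>
    have h : (fun p => S p || List.any [] (fun r => (PySem.List.pyRange 0 n 1).any
        (fun c => (pvFired board m n r c).contains p))) = S := by
      funext p; simp
    rw [List.foldl_nil, h]
  | cons r rs ih =>
    obtain ⟨hr0, hr1⟩ := hrs r (by simp)
    have hcs : ∀ c ∈ PySem.List.pyRange 0 n 1, 0 ≤ c ∧ c < n := by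
      intro c hc
      exact (PySem.List.mem_pyRange_one).mp hc
    rw [List.foldl_cons, foldc_eq board m n hd r hr0 hr1 _ hcs S,
        ih (fun r hr => hrs r (by simp [hr]))]
    have h : (fun p => (S p || (PySem.List.pyRange 0 n 1).any
          (fun c => (pvFired board m n r c).contains p)) ||
        rs.any (fun r => (PySem.List.pyRange 0 n 1).any
          (fun c => (pvFired board m n r c).contains p))) =
        (fun p => S p || (r :: rs).any (fun r => (PySem.List.pyRange 0 n 1).any
          (fun c => (pvFired board m n r c).contains p))) := by
      funext p
      rw [List.any_cons, Bool.or_assoc]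
    rw [h]

-- the Bool predicate A's scan realises
def pvSA (board : List (List String)) (m n : Int) (p : Int × Int) : Bool :=
  (PySem.List.pyRange 0 m 1).any (fun r => (PySem.List.pyRange 0 n 1).any
    (fun c => (pvFired board m n r c).contains p))

theorem eraseA_char (board : List (List String)) (m n : Int) (hd : DimOk board m n) :
    erase_block m n board =
      (renderF board (pvSA board m n),
       ((indF m n (pvSA board m n)).map (fun row => row.foldl (· + ·) 0)).foldl (· + ·) 0) := by
  unfold erase_block
  have hinit : (board, List.replicate m.toNat (List.replicate n.toNat (0 : Int))) =
      (renderF board (fun _ => false), indF m n (fun _ => false)) := by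
    rw [renderF_false, indF_false]
  have hrs : ∀ r ∈ PySem.List.pyRange 0 m 1, 0 ≤ r ∧ r < m := by
    intro r hr
    exact (PySem.List.mem_pyRange_one).mp hr
  dsimp only
  rw [hinit, foldr_eq board m n hd _ hrs]
  have h : (fun p => false || (PySem.List.pyRange 0 m 1).any
      (fun r => (PySem.List.pyRange 0 n 1).any
        (fun c => (pvFired board m n r c).contains p))) = pvSA board m n := by
    funext p
    rw [Bool.false_or]
    rfl
  rw [h]

theorem allEq_of_set4 (a b c d : String)
    (h : (PySem.Set.ofList [a, b, c, d]).length = 1) : b = a ∧ c = a ∧ d = a := by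
  obtain ⟨x, hx⟩ := List.length_eq_one_iff.mp h
  have ha : a ∈ PySem.Set.ofList [a, b, c, d] := by rw [PySem.Set.mem_ofList]; simp
  have hb : b ∈ PySem.Set.ofList [a, b, c, d] := by rw [PySem.Set.mem_ofList]; simp
  have hc : c ∈ PySem.Set.ofList [a, b, c, d] := by rw [PySem.Set.mem_ofList]; simp
  have hd : d ∈ PySem.Set.ofList [a, b, c, d] := by rw [PySem.Set.mem_ofList]; simp
  rw [hx] at ha hb hc hd
  simp at ha hb hc hd
  simp [ha, hb, hc, hd]

theorem set4_allEq (a : String) : (PySem.Set.ofList [a, a, a, a]).length = 1 := by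
  simp [PySem.Set.ofList, PySem.Set.add]

theorem cond_eqs (board : List (List String)) (m n r c dr dc : Int)
    (h : pvCond board m n r c dr dc = true) :
    pvGet2 board r (c + dc) = pvGet2 board r c ∧
    pvGet2 board (r + dr) (c + dc) = pvGet2 board r c ∧
    pvGet2 board (r + dr) c = pvGet2 board r c := by
  unfold pvCond at h
  simp only [Bool.and_eq_true, beq_iff_eq] at h
  exact allEq_of_set4 _ _ _ _ h.2

theorem cond_intro (board : List (List String)) (m n r c dr dc : Int)
    (hb0 : 0 ≤ r + dr) (hb1 : r + dr < m) (hb2 : 0 ≤ c + dc) (hb3 : c + dc < n)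
    (e1 : pvGet2 board r (c + dc) = pvGet2 board r c)
    (e2 : pvGet2 board (r + dr) (c + dc) = pvGet2 board r c)
    (e3 : pvGet2 board (r + dr) c = pvGet2 board r c) :
    pvCond board m n r c dr dc = true := by
  unfold pvCond
  simp only [Bool.and_eq_true, decide_eq_true_eq, beq_iff_eq]
  refine ⟨⟨⟨⟨hb0, hb1⟩, hb2⟩, hb3⟩, ?_⟩
  rw [e1, e2, e3]
  exact set4_allEq _

theorem corner_eqs (board : List (List String)) (r0 c0 : Int)
    (h : pvCorner board r0 c0 = true) :
    ("A" ≤ pvGet2 board r0 c0 ∧ pvGet2 board r0 c0 ≤ "Z") ∧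
    pvGet2 board r0 (c0 + 1) = pvGet2 board r0 c0 ∧
    pvGet2 board (r0 + 1) c0 = pvGet2 board r0 c0 ∧
    pvGet2 board (r0 + 1) (c0 + 1) = pvGet2 board r0 c0 := by
  unfold pvCorner at h
  simp only [Bool.and_eq_true, beq_iff_eq, decide_eq_true_eq] at h
  exact ⟨⟨h.1.1.1.1, h.1.1.1.2⟩, h.1.1.2, h.1.2, h.2⟩

theorem corner_intro (board : List (List String)) (r0 c0 : Int)
    (h1 : "A" ≤ pvGet2 board r0 c0) (h2 : pvGet2 board r0 c0 ≤ "Z")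
    (e1 : pvGet2 board r0 (c0 + 1) = pvGet2 board r0 c0)
    (e2 : pvGet2 board (r0 + 1) c0 = pvGet2 board r0 c0)
    (e3 : pvGet2 board (r0 + 1) (c0 + 1) = pvGet2 board r0 c0) :
    pvCorner board r0 c0 = true := by
  unfold pvCorner
  simp only [Bool.and_eq_true, beq_iff_eq, decide_eq_true_eq]
  exact ⟨⟨⟨⟨h1, h2⟩, e1⟩, e2⟩, e3⟩

theorem upper_ne_space (v : String) (h : "A" ≤ v) : (v == " ") = false := by
  rw [beq_eq_false_iff_ne]
  intro hv
  rw [hv] at h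
  have : ¬ ("A" : String) ≤ " " := by
    simp [String.le_iff_toList_le]
    exact List.Lex.rel (by decide)
  exact this h

theorem mem_fired_self (board : List (List String)) (m n r c : Int)
    (h1 : "A" ≤ pvGet2 board r c) (h2 : pvGet2 board r c ≤ "Z")
    (hor : pvCond board m n r c (-1) (-1) = true ∨ pvCond board m n r c (-1) 1 = true ∨
           pvCond board m n r c 1 (-1) = true ∨ pvCond board m n r c 1 1 = true) :
    (r, c) ∈ pvFired board m n r c := by
  unfold pvFired
  dsimp only
  rw [upper_ne_space _ h1]
  simp only [Bool.false_eq_true, if_false, decide_eq_true h1, decide_eq_true h2,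
    Bool.and_self, if_true]
  split_ifs with hc1 hc2 hc3 hc4
  · simp [pvBlockPts]
  · simp [pvBlockPts]
  · simp [pvBlockPts]
  · simp [pvBlockPts]
  · rcases hor with h | h | h | h <;> contradiction

theorem marked_bounds (board : List (List String)) (m n : Int) (p : Int × Int)
    (h : MarkedP board m n p) : 0 ≤ p.1 ∧ p.1 < m ∧ 0 ≤ p.2 ∧ p.2 < n := by
  obtain ⟨r, c, hr0, hr1, hc0, hc1, _, hmem⟩ := h
  simp only [List.mem_cons, List.not_mem_nil, or_false] at hmem
  rcases hmem with rfl | rfl | rfl | rfl <;> simp <;> omega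

theorem SA_iff_marked (board : List (List String)) (m n : Int) (p : Int × Int) :
    pvSA board m n p = true ↔ MarkedP board m n p := by
  constructor
  · intro h
    unfold pvSA at h
    rw [List.any_eq_true] at h
    obtain ⟨r, hr, h⟩ := h
    rw [List.any_eq_true] at h
    obtain ⟨c, hc, h⟩ := h
    rw [List.contains_iff_mem] at h
    obtain ⟨hr0, hr1⟩ := (PySem.List.mem_pyRange_one).mp hr
    obtain ⟨hc0, hc1⟩ := (PySem.List.mem_pyRange_one).mp hc
    unfold pvFired at h
    dsimp only at h
    split_ifs at h with hsp hup hc1' hc2' hc3' hc4'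
    all_goals try exact absurd h (List.not_mem_nil)
    all_goals simp only [Bool.and_eq_true, decide_eq_true_eq] at hup
    · -- orientation (-1, -1), corner (r-1, c-1)
      obtain ⟨hb0, hb1, hb2, hb3⟩ := cond_bounds board m n r c (-1) (-1) hc1'
      obtain ⟨e1, e2, e3⟩ := cond_eqs board m n r c (-1) (-1) hc1'
      rw [show c + -1 = c - 1 by ring] at e1
      rw [show r + -1 = r - 1 by ring, show c + -1 = c - 1 by ring] at e2
      rw [show r + -1 = r - 1 by ring] at e3
      have k1 : c - 1 + 1 = c := by ring
      have k2 : r - 1 + 1 = r := by ring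
      refine ⟨r - 1, c - 1, by omega, by omega, by omega, by omega, ?_, ?_⟩
      · exact corner_intro board (r - 1) (c - 1) (by rw [e2]; exact hup.1)
          (by rw [e2]; exact hup.2) (by rw [k1, e3, e2]) (by rw [k2, e1, e2])
          (by rw [k2, k1, e2])
      · simp only [pvBlockPts, List.mem_cons, List.not_mem_nil, or_false, Prod.ext_iff] at h ⊢
        omega
    · -- orientation (-1, 1), corner (r-1, c)
      obtain ⟨hb0, hb1, hb2, hb3⟩ := cond_bounds board m n r c (-1) 1 hc2'
      obtain ⟨e1, e2, e3⟩ := cond_eqs board m n r c (-1) 1 hc2'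
      rw [show r + -1 = r - 1 by ring] at e2
      rw [show r + -1 = r - 1 by ring] at e3
      have k2 : r - 1 + 1 = r := by ring
      refine ⟨r - 1, c, by omega, by omega, by omega, by omega, ?_, ?_⟩
      · exact corner_intro board (r - 1) c (by rw [e3]; exact hup.1)
          (by rw [e3]; exact hup.2) (by rw [e2, e3]) (by rw [k2, e3]) (by rw [k2, e1, e3])
      · simp only [pvBlockPts, List.mem_cons, List.not_mem_nil, or_false, Prod.ext_iff] at h ⊢
        omega
    · -- orientation (1, -1), corner (r, c-1)
      obtain ⟨hb0, hb1, hb2, hb3⟩ := cond_bounds board m n r c 1 (-1) hc3'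
      obtain ⟨e1, e2, e3⟩ := cond_eqs board m n r c 1 (-1) hc3'
      rw [show c + -1 = c - 1 by ring] at e1
      rw [show c + -1 = c - 1 by ring] at e2
      have k1 : c - 1 + 1 = c := by ring
      refine ⟨r, c - 1, by omega, by omega, by omega, by omega, ?_, ?_⟩
      · exact corner_intro board r (c - 1) (by rw [e1]; exact hup.1)
          (by rw [e1]; exact hup.2) (by rw [k1, e1]) (by rw [e2, e1]) (by rw [k1, e3, e1])
      · simp only [pvBlockPts, List.mem_cons, List.not_mem_nil, or_false, Prod.ext_iff] at h ⊢
        omega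
    · -- orientation (1, 1), corner (r, c)
      obtain ⟨hb0, hb1, hb2, hb3⟩ := cond_bounds board m n r c 1 1 hc4'
      obtain ⟨e1, e2, e3⟩ := cond_eqs board m n r c 1 1 hc4'
      refine ⟨r, c, by omega, by omega, by omega, by omega, ?_, ?_⟩
      · exact corner_intro board r c hup.1 hup.2 e1 e3 e2
      · simp only [pvBlockPts, List.mem_cons, List.not_mem_nil, or_false, Prod.ext_iff] at h ⊢
        omega
  · rintro ⟨r0, c0, hr0, hr1, hc0, hc1, hcor, hmem⟩
    have hbm := marked_bounds board m n p ⟨r0, c0, hr0, hr1, hc0, hc1, hcor, hmem⟩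
    obtain ⟨⟨hu1, hu2⟩, e1, e2, e3⟩ := corner_eqs board r0 c0 hcor
    unfold pvSA
    rw [List.any_eq_true]
    refine ⟨p.1, (PySem.List.mem_pyRange_one).mpr ⟨hbm.1, hbm.2.1⟩, ?_⟩
    rw [List.any_eq_true]
    refine ⟨p.2, (PySem.List.mem_pyRange_one).mpr ⟨hbm.2.2.1, hbm.2.2.2⟩, ?_⟩
    rw [List.contains_iff_mem]
    have i1 : c0 + 1 + -1 = c0 := by ring
    have i2 : r0 + 1 + -1 = r0 := by ring
    simp only [List.mem_cons, List.not_mem_nil, or_false] at hmem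
    rcases hmem with rfl | rfl | rfl | rfl
    · -- p = (r0, c0): orientation (1, 1)
      exact mem_fired_self board m n r0 c0 hu1 hu2
        (Or.inr (Or.inr (Or.inr (cond_intro board m n r0 c0 1 1 (by omega) (by omega)
          (by omega) (by omega) e1 e3 e2))))
    · -- p = (r0, c0+1): orientation (1, -1)
      have hv : pvGet2 board r0 (c0 + 1) = pvGet2 board r0 c0 := e1
      exact mem_fired_self board m n r0 (c0 + 1) (by rw [hv]; exact hu1) (by rw [hv]; exact hu2)
        (Or.inr (Or.inr (Or.inl (cond_intro board m n r0 (c0 + 1) 1 (-1) (by omega) (by omega)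
          (by omega) (by omega) (by rw [i1, hv]) (by rw [i1, e2, hv]) (by rw [e3, hv])))))
    · -- p = (r0+1, c0): orientation (-1, 1)
      have hv : pvGet2 board (r0 + 1) c0 = pvGet2 board r0 c0 := e2
      exact mem_fired_self board m n (r0 + 1) c0 (by rw [hv]; exact hu1) (by rw [hv]; exact hu2)
        (Or.inr (Or.inl (cond_intro board m n (r0 + 1) c0 (-1) 1 (by omega) (by omega)
          (by omega) (by omega) (by rw [e3, hv]) (by rw [i2, e1, hv]) (by rw [i2, hv]))))
    · -- p = (r0+1, c0+1): orientation (-1, -1)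
      have hv : pvGet2 board (r0 + 1) (c0 + 1) = pvGet2 board r0 c0 := e3
      exact mem_fired_self board m n (r0 + 1) (c0 + 1) (by rw [hv]; exact hu1) (by rw [hv]; exact hu2)
        (Or.inl (cond_intro board m n (r0 + 1) (c0 + 1) (-1) (-1) (by omega) (by omega)
          (by omega) (by omega) (by rw [i1, e2, hv]) (by rw [i1, i2, hv]) (by rw [i2, e1, hv])))

-- B's erased set
def pvErased (board : List (List String)) (m n : Int) : PySem.Set (Int × Int) :=
  (PySem.List.pyRange 0 (m - 1) 1).foldl (fun e r =>
    (PySem.List.pyRange 0 (n - 1) 1).foldl (fun e c =>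
      if pvCorner board r c then
        PySem.Set.update e [(r, c), (r, c + 1), (r + 1, c), (r + 1, c + 1)]
      else e) e) PySem.Set.empty

theorem mem_inner (board : List (List String)) (r : Int) (cs : List Int)
    (e : PySem.Set (Int × Int)) (p : Int × Int) :
    p ∈ cs.foldl (fun e c => if pvCorner board r c then
        PySem.Set.update e [(r, c), (r, c + 1), (r + 1, c), (r + 1, c + 1)] else e) e ↔
      p ∈ e ∨ ∃ c ∈ cs, pvCorner board r c = true ∧
        p ∈ [(r, c), (r, c + 1), (r + 1, c), (r + 1, c + 1)] := by
  induction cs generalizing e with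
  | nil => simp
  | cons c cs ih =>
    rw [List.foldl_cons, ih]
    by_cases hc : pvCorner board r c = true
    · simp only [hc, if_true, PySem.Set.mem_update]
      constructor
      · rintro (⟨h | h⟩ | ⟨c', hc', h1, h2⟩)
        · exact Or.inl h
        · exact Or.inr ⟨c, by simp, hc, h⟩
        · exact Or.inr ⟨c', by simp [hc'], h1, h2⟩
      · rintro (h | ⟨c', hc', h1, h2⟩)
        · exact Or.inl (Or.inl h)
        · rcases List.mem_cons.mp hc' with rfl | hc'
          · exact Or.inl (Or.inr h2)
          · exact Or.inr ⟨c', hc', h1, h2⟩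
    · simp only [hc]
      constructor
      · rintro (h | ⟨c', hc', h1, h2⟩)
        · exact Or.inl h
        · exact Or.inr ⟨c', by simp [hc'], h1, h2⟩
      · rintro (h | ⟨c', hc', h1, h2⟩)
        · exact Or.inl h
        · rcases List.mem_cons.mp hc' with rfl | hc'
          · exact absurd h1 hc
          · exact Or.inr ⟨c', hc', h1, h2⟩


theorem nodup_inner (board : List (List String)) (r : Int) (cs : List Int)
    (e : PySem.Set (Int × Int)) (he : e.Nodup) :
    (cs.foldl (fun e c => if pvCorner board r c then
        PySem.Set.update e [(r, c), (r, c + 1), (r + 1, c), (r + 1, c + 1)] else e) e).Nodup := by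
  induction cs generalizing e with
  | nil => exact he
  | cons c cs ih =>
    rw [List.foldl_cons]
    apply ih
    split
    · exact PySem.Set.nodup_update _ _ he
    · exact he

theorem mem_outer (board : List (List String)) (n : Int) (rs : List Int)
    (e : PySem.Set (Int × Int)) (p : Int × Int) :
    p ∈ rs.foldl (fun e r => (PySem.List.pyRange 0 (n - 1) 1).foldl (fun e c =>
        if pvCorner board r c then
          PySem.Set.update e [(r, c), (r, c + 1), (r + 1, c), (r + 1, c + 1)]
        else e) e) e ↔
      p ∈ e ∨ ∃ r ∈ rs, ∃ c ∈ PySem.List.pyRange 0 (n - 1) 1, pvCorner board r c = true ∧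
        p ∈ [(r, c), (r, c + 1), (r + 1, c), (r + 1, c + 1)] := by
  induction rs generalizing e with
  | nil => simp
  | cons r rs ih =>
    rw [List.foldl_cons, ih, mem_inner]
    constructor
    · rintro (⟨h | ⟨c, hc, h1, h2⟩⟩ | ⟨r', hr', c, hc, h1, h2⟩)
      · exact Or.inl h
      · exact Or.inr ⟨r, by simp, c, hc, h1, h2⟩
      · exact Or.inr ⟨r', by simp [hr'], c, hc, h1, h2⟩
    · rintro (h | ⟨r', hr', c, hc, h1, h2⟩)
      · exact Or.inl (Or.inl h)
      · rcases List.mem_cons.mp hr' with rfl | hr'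
        · exact Or.inl (Or.inr ⟨c, hc, h1, h2⟩)
        · exact Or.inr ⟨r', hr', c, hc, h1, h2⟩

theorem mem_erased (board : List (List String)) (m n : Int) (p : Int × Int) :
    p ∈ pvErased board m n ↔ MarkedP board m n p := by
  unfold pvErased MarkedP
  rw [mem_outer]
  simp only [PySem.Set.empty, List.not_mem_nil, false_or, PySem.List.mem_pyRange_one]
  constructor
  · rintro ⟨r, ⟨hr0, hr1⟩, c, ⟨hc0, hc1⟩, h1, h2⟩
    exact ⟨r, c, hr0, hr1, hc0, hc1, h1, h2⟩
  · rintro ⟨r, c, hr0, hr1, hc0, hc1, h1, h2⟩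
    exact ⟨r, ⟨hr0, hr1⟩, c, ⟨hc0, hc1⟩, h1, h2⟩

theorem nodup_erased (board : List (List String)) (m n : Int) :
    (pvErased board m n).Nodup := by
  unfold pvErased
  have h : ∀ (rs : List Int) (e : PySem.Set (Int × Int)), e.Nodup →
      (rs.foldl (fun e r => (PySem.List.pyRange 0 (n - 1) 1).foldl (fun e c =>
        if pvCorner board r c then
          PySem.Set.update e [(r, c), (r, c + 1), (r + 1, c), (r + 1, c + 1)]
        else e) e) e).Nodup := by
    intro rs
    induction rs with
    | nil => exact fun e he => he
    | cons r rs ih =>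
      intro e he
      rw [List.foldl_cons]
      exact ih _ (nodup_inner board r _ e he)
  exact h _ _ List.nodup_nil

theorem cast_pair_inj : Function.Injective (fun (q : Nat × Nat) => ((q.1 : Int), (q.2 : Int))) := by
  intro a b h
  simp only [Prod.ext_iff] at h ⊢
  omega

theorem sum_counts (l1 l2 : List Nat) (S : Nat → Nat → Bool) :
    (l1.map (fun i => l2.countP (fun j => S i j))).sum = (l1 ×ˢ l2).countP (fun q => S q.1 q.2) := by
  induction l1 with
  | nil => simp
  | cons a l ih =>
    rw [List.map_cons, List.sum_cons, List.product_cons, List.countP_append, ih, List.countP_map]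
    congr 1

theorem count_eq (board : List (List String)) (m n : Int) :
    ((indF m n (pvSA board m n)).map (fun row => row.foldl (· + ·) 0)).foldl (· + ·) 0 =
      ((pvErased board m n).length : Int) := by
  have hsum : ∀ (l : List Int), l.foldl (· + ·) 0 = l.sum := fun l => Eq.symm List.sum_eq_foldl
  have hmap : (indF m n (pvSA board m n)).map (fun row => row.foldl (· + ·) 0) =
      (indF m n (pvSA board m n)).map (fun row => row.sum) := by
    apply List.map_congr_left
    intro row _
    exact hsum row
  rw [hsum, hmap]
  have h1 : (indF m n (pvSA board m n)).map (fun row => row.sum) =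
      (List.range m.toNat).map (fun (i : Nat) =>
        (((List.range n.toNat).countP (fun (j : Nat) => pvSA board m n ((i : Int), (j : Int)))) : Int)) := by
    unfold indF
    rw [List.map_map]
    apply List.map_congr_left
    intro i _
    exact PySem.List.sum_map_ite_one_zero (fun (j : Nat) => pvSA board m n ((i : Int), (j : Int))) _
  rw [h1]
  have h2 : (List.range m.toNat).map (fun (i : Nat) =>
        (((List.range n.toNat).countP (fun (j : Nat) => pvSA board m n ((i : Int), (j : Int)))) : Int)) =
      ((List.range m.toNat).map (fun (i : Nat) =>
        (List.range n.toNat).countP (fun (j : Nat) => pvSA board m n ((i : Int), (j : Int))))).map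
        (fun (x : Nat) => (x : Int)) := by
    rw [List.map_map]
    rfl
  rw [h2, ← Nat.cast_list_sum,
      sum_counts (List.range m.toNat) (List.range n.toNat)
        (fun i j => pvSA board m n ((i : Int), (j : Int)))]
  have hperm : (((List.range m.toNat ×ˢ List.range n.toNat).filter
        (fun q => pvSA board m n ((q.1 : Int), (q.2 : Int)))).map
        (fun (q : Nat × Nat) => ((q.1 : Int), (q.2 : Int)))).Perm (pvErased board m n) := by
    have hnd1 : (((List.range m.toNat ×ˢ List.range n.toNat).filter
        (fun q => pvSA board m n ((q.1 : Int), (q.2 : Int)))).map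
        (fun (q : Nat × Nat) => ((q.1 : Int), (q.2 : Int)))).Nodup :=
      ((List.Nodup.product List.nodup_range List.nodup_range).filter _).map cast_pair_inj
    apply (List.perm_ext_iff_of_nodup hnd1 (nodup_erased board m n)).mpr
    · intro p
      rw [mem_erased]
      constructor
      · intro hp
        obtain ⟨q, hq, rfl⟩ := List.mem_map.mp hp
        obtain ⟨hqm, hQ⟩ := List.mem_filter.mp hq
        exact (SA_iff_marked board m n _).mp hQ
      · intro hp
        have hS := (SA_iff_marked board m n p).mpr hp
        have hb := marked_bounds board m n p hp
        refine List.mem_map.mpr ⟨(p.1.toNat, p.2.toNat), List.mem_filter.mpr ⟨?_, ?_⟩, ?_⟩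
        · refine List.pair_mem_product.mpr ⟨List.mem_range.mpr (by omega), List.mem_range.mpr (by omega)⟩
        · simp only
          rw [Int.toNat_of_nonneg hb.1, Int.toNat_of_nonneg hb.2.2.1]
          exact hS
        · simp only
          rw [Int.toNat_of_nonneg hb.1, Int.toNat_of_nonneg hb.2.2.1]
  rw [List.countP_eq_length_filter, ← hperm.length_eq, List.length_map]


theorem altB_char (m n : Int) (board : List (List String)) :
    erase_block_alt m n board =
      (renderF board (fun p => PySem.Set.contains (pvErased board m n) p),
       ((pvErased board m n).length : Int)) := rfl

theorem SA_eq_contains (board : List (List String)) (m n : Int) :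
    pvSA board m n = (fun p => PySem.Set.contains (pvErased board m n) p) := by
  funext p
  rw [Bool.eq_iff_iff, SA_iff_marked, ← mem_erased board m n p]
  exact (PySem.Set.contains_iff _ _).symm

theorem main_eq (m n : Int) (board : List (List String)) (hd : DimOk board m n) :
    erase_block m n board = erase_block_alt m n board := by
  rw [eraseA_char board m n hd, altB_char, count_eq board m n, SA_eq_contains board m n]

-- ===== VERDICT (by name: the statement is the Claim_ definition above) =====
theorem erase_block_spec : Claim_equal_erase_block := by
  intro m n board _ hpre
  unfold Spec_erase_block
  apply main_eq
  intro r c hr0 hr1 hc0 hc1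
  have h := hpre (by omega)
  constructor
  · omega
  · have hmem : board.getD r.toNat [] ∈ board.take m.toNat := by
      have hlt : r.toNat < board.length := by omega
      have : board.getD r.toNat [] = board[r.toNat] := List.getD_eq_getElem board [] hlt
      rw [this]
      refine List.mem_take_iff_getElem.mpr ⟨r.toNat, ?_, ?_⟩
      · simp; omega
      · rfl
    have := h.2 _ hmem
    omega
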